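-- pv_equiv track=rewrite | github.com/Minhazuddin-Molla/Python | Untitled-1.py | Evil
-- ===== SOURCE A (Python) =====
-- def Evil(n,c):
--    if c<len(n):
--        if n[c]=="1":
--            return 1+Evil(n,c+1)
--        else:
--            return Evil(n,c+1)
--    else:
--        return 0
-- ===== SOURCE B (Python) =====
-- def Evil(n, c):
--     count = 0
--     while c < len(n):
--         if n[c] == "1":
--             count += 1
--         c += 1
--     return count
-- ===== Notes on version B (the rewrite author's own statement) =====
-- stated objective: simpler
-- what changed: Replaces the non-tail recursion with an explicit iterative while-loop over the same index walk, accumulating the count in a local variable.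
import Mathlib
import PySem

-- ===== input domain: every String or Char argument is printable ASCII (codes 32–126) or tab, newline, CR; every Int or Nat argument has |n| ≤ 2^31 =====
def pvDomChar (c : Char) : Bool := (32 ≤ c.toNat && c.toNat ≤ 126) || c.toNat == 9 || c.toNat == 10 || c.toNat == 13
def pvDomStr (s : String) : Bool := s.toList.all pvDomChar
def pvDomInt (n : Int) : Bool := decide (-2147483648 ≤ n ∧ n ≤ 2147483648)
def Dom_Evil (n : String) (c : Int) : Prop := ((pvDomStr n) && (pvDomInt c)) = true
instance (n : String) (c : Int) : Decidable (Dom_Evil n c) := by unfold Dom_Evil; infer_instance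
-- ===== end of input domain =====

-- B replaces A's non-tail recursion by an iterative count-accumulating loop (simpler, O(1) space).
-- Equivalence proved on Pre_: A raises IndexError when c < -len(n); otherwise B returns A's value.

-- ===== PORT A =====
def Evil (n : String) (c : Int) : Int :=
  if _h : c < PySem.Str.len n then
    match PySem.Str.pyGet? n c with
    | some ch => if ch = '1' then 1 + Evil n (c + 1) else Evil n (c + 1)
    | none => 0          -- Python raises IndexError here (c < -len(n)); excluded by Pre_Evil
  else 0
termination_by (PySem.Str.len n - c).toNat
decreasing_by simp only [PySem.Str.len_eq] at *; omega

-- ===== PORT B =====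
-- the while-loop of Source B as a tail-recursive helper over (index, count)
def evilLoop (n : String) (c : Int) (count : Int) : Int :=
  if _h : c < PySem.Str.len n then
    evilLoop n (c + 1) (if PySem.Str.pyGet? n c = some '1' then count + 1 else count)
  else count
termination_by (PySem.Str.len n - c).toNat
decreasing_by simp only [PySem.Str.len_eq] at *; omega

def Evil_alt (n : String) (c : Int) : Int := evilLoop n c 0

-- ===== PRECONDITION & SPEC =====
-- Pre_ excludes exactly the inputs where Python A raises IndexError: c < -len(n) (n[c] out of range).
def Pre_Evil (n : String) (c : Int) : Prop := -(PySem.Str.len n) ≤ c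
instance (n : String) (c : Int) : Decidable (Pre_Evil n c) := by unfold Pre_Evil; infer_instance
def pvWitness_Evil : String × Int := ("1011", -3)

def Spec_Evil (n : String) (c : Int) (out : Int) : Prop := out = Evil_alt n c
instance (n : String) (c : Int) (out : Int) : Decidable (Spec_Evil n c out) := by unfold Spec_Evil; infer_instance

-- ===== CLAIM (what is proved, stated in full; the proofs are below) =====
def Claim_equal_Evil : Prop := ∀ (n : String) (c : Int), Dom_Evil n c → Pre_Evil n c → Spec_Evil n c (Evil n c)

-- ===== LEMMAS AND PROOFS =====

-- loop invariant: the accumulator adds to A's value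
theorem evilLoop_eq (n : String) : ∀ (k : Nat) (c acc : Int),
    (PySem.Str.len n - c).toNat ≤ k → -(PySem.Str.len n) ≤ c →
    evilLoop n c acc = acc + Evil n c := by
  intro k
  induction k with
  | zero =>
    intro c acc hk hpre
    rw [evilLoop, Evil]
    have hnl : ¬ c < PySem.Str.len n := by omega
    rw [dif_neg hnl, dif_neg hnl]
    omega
  | succ k ih =>
    intro c acc hk hpre
    rw [evilLoop, Evil]
    by_cases hlt : c < PySem.Str.len n
    · rw [dif_pos hlt, dif_pos hlt]
      have hL : PySem.Str.len n = (n.toList.length : Int) := PySem.Str.len_eq n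
      have hk' : (PySem.Str.len n - (c + 1)).toNat ≤ k := by omega
      have hpre' : -(PySem.Str.len n) ≤ c + 1 := by omega
      cases hget : PySem.Str.pyGet? n c with
      | none =>
        exfalso
        have hnone : PySem.List.pyGet? n.toList c = none := by
          simpa [PySem.Str.pyGet?] using hget
        have := (PySem.List.pyGet?_eq_none_iff (xs := n.toList) (i := c)).mp hnone
        exact this (by unfold PySem.Raise.InRange; omega)
      | some ch =>
        have hgetL : PySem.List.pyGet? n.toList c = some ch := by
          simpa [PySem.Str.pyGet?] using hget
        have hmatch : (match (some ch : Option Char) with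
            | some ch => if ch = '1' then 1 + Evil n (c + 1) else Evil n (c + 1)
            | none => 0) = if ch = '1' then 1 + Evil n (c + 1) else Evil n (c + 1) := rfl
        rw [hmatch]
        by_cases h1 : ch = '1'
        · subst h1
          rw [if_pos rfl, if_pos rfl, ih (c + 1) (acc + 1) hk' hpre']
          ring
        · rw [if_neg (by simpa using h1), if_neg h1, ih (c + 1) acc hk' hpre']
    · rw [dif_neg hlt, dif_neg hlt]
      omega

-- ===== VERDICT (by name: the statement is the Claim_ definition above) =====
theorem Evil_spec : Claim_equal_Evil := by
  intro n c _ hpre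
  unfold Spec_Evil Evil_alt
  rw [evilLoop_eq n (PySem.Str.len n - c).toNat c 0 le_rfl hpre]
  ring
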